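-- pv_equiv track=rewrite | github.com/UzairAI/AffinityAnswers-Task | affinityanswers.py | prof_deg
-- ===== SOURCE A (Python) =====
-- def prof_deg(tweet, racial_slurs):
--     # Degree of profanity is initialized to 0.
--     prof_deg = 0
--     # Looping through each word in the tweet.
--     # And checking for each profanity degree,
--     # If the word exists in the list associated to that degree,
--     # The variable prof_deg is incremented by that degree.
--     for word in tweet:
--         for degree in racial_slurs:
--             if word in racial_slurs[degree]:
--                 if degree > prof_deg:
--                     prof_deg = degree
--     return prof_deg
-- ===== SOURCE B (Python) =====
-- def prof_deg(tweet, racial_slurs):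
--     # One pass over the degrees: precompute the tweet's word set once,
--     # then a degree matches iff any of its slurs is among the tweet's words.
--     words = set(tweet)
--     best = 0
--     for degree, slurs in racial_slurs.items():
--         if degree > best and any(s in words for s in slurs):
--             best = degree
--     return best
-- ===== Notes on version B (the rewrite author's own statement) =====
-- stated objective: faster
-- what changed: Replaces the nested word-by-word scan (each word tested against each degree's slur list via a repeated dict lookup) with a single pass over the dict items that tests each slur list once against a precomputed set of tweet words.
import Mathlib
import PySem

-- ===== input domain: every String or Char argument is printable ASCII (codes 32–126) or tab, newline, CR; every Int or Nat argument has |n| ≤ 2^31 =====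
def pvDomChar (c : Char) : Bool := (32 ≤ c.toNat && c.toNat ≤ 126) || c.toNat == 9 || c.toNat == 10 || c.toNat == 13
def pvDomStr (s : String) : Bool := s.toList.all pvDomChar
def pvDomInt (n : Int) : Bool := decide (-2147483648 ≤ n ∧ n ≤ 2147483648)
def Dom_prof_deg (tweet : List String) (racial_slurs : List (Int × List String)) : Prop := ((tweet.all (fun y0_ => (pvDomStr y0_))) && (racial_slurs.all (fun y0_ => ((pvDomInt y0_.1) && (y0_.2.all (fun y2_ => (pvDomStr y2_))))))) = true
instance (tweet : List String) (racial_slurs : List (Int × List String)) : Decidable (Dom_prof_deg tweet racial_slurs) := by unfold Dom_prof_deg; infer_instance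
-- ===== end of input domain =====

-- B replaces A's nested word×degree scan (with a dict lookup per degree per word) by a single
-- pass over the dict items against a precomputed set of the tweet's words (objective: faster).


-- ===== PORT A =====
-- for word in tweet: for degree in racial_slurs: if word in racial_slurs[degree]: if degree > prof_deg: prof_deg = degree
-- 'racial_slurs[degree]' is a dict lookup whose key comes from the dict's own iteration, so it is
-- always present; getD with a dummy default is exact there.
def prof_deg (tweet : List String) (racial_slurs : List (Int × List String)) : Int :=
  tweet.foldl (fun pd word =>
    racial_slurs.foldl (fun pd p =>
      let degree := p.1
      if word ∈ (PySem.Dict.mk racial_slurs).getD degree [] then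
        if degree > pd then degree else pd
      else pd) pd) 0

-- ===== PORT B =====
-- words = set(tweet); for degree, slurs in items: if degree > best and any(s in words for s in slurs): best = degree
def prof_deg_alt (tweet : List String) (racial_slurs : List (Int × List String)) : Int :=
  let words : PySem.Set String := PySem.Set.ofList tweet
  racial_slurs.foldl (fun best p =>
    if p.1 > best ∧ (p.2.any (fun s => PySem.Set.contains words s)) = true then p.1 else best) 0

-- ===== PRECONDITION & SPEC =====
-- Pre_ excludes association lists with duplicate degree keys, which cannot arise from a Python
-- dict (there A's per-key lookup and B's items() iteration are the same mapping by construction).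
def Pre_prof_deg (tweet : List String) (racial_slurs : List (Int × List String)) : Prop :=
  (racial_slurs.map Prod.fst).Nodup
instance (tweet : List String) (racial_slurs : List (Int × List String)) : Decidable (Pre_prof_deg tweet racial_slurs) := by unfold Pre_prof_deg; infer_instance

def pvWitness_prof_deg : List String × (List (Int × List String)) :=
  (["you", "fool"], [(1, ["silly"]), (2, ["fool"]), (3, ["monster"])])

def Spec_prof_deg (tweet : List String) (racial_slurs : List (Int × List String)) (out : Int) : Prop := out = prof_deg_alt tweet racial_slurs
instance (tweet : List String) (racial_slurs : List (Int × List String)) (out : Int) : Decidable (Spec_prof_deg tweet racial_slurs out) := by unfold Spec_prof_deg; infer_instance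

-- ===== CLAIM (what is proved, stated in full; the proofs are below) =====
def Claim_equal_prof_deg : Prop := ∀ (tweet : List String) (racial_slurs : List (Int × List String)), Dom_prof_deg tweet racial_slurs → Pre_prof_deg tweet racial_slurs → Spec_prof_deg tweet racial_slurs (prof_deg tweet racial_slurs)

-- ===== LEMMAS AND PROOFS =====

-- Canonical shape of one update: "if the condition holds, take the max with the degree".
def condMax (c : Int × List String → Bool) (a : Int) (p : Int × List String) : Int :=
  if c p then max a p.1 else a

-- A condMax fold distributes over max in its accumulator.
theorem foldl_condMax_max (c : Int × List String → Bool)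
    (rs : List (Int × List String)) :
    ∀ (acc v : Int), rs.foldl (condMax c) (max acc v) = max (rs.foldl (condMax c) acc) v := by
  induction rs with
  | nil => intro acc v; rfl
  | cons q rs' ih =>
      intro acc v
      have h : condMax c (max acc v) q = max (condMax c acc q) v := by
        unfold condMax; split_ifs <;> omega
      simp only [List.foldl_cons, h, ih]

-- Two condMax passes over the same list merge into one with the disjunction of the conditions.
theorem foldl_condMax_merge (c1 c2 : Int × List String → Bool)
    (rs : List (Int × List String)) :
    ∀ acc : Int, rs.foldl (condMax c1) (rs.foldl (condMax c2) acc)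
      = rs.foldl (condMax (fun p => c2 p || c1 p)) acc := by
  induction rs with
  | nil => intro acc; rfl
  | cons p rs' ih =>
      intro acc
      simp only [List.foldl_cons]
      by_cases h1 : c1 p = true
      · have key : condMax c1 (rs'.foldl (condMax c2) (condMax c2 acc p)) p
            = rs'.foldl (condMax c2) (condMax (fun q => c2 q || c1 q) acc p) := by
          have hm : max (condMax c2 acc p) p.1 = condMax (fun q => c2 q || c1 q) acc p := by
            unfold condMax; simp [h1]; split_ifs <;> omega
          calc condMax c1 (rs'.foldl (condMax c2) (condMax c2 acc p)) p
              = max (rs'.foldl (condMax c2) (condMax c2 acc p)) p.1 := by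
                unfold condMax; simp [h1]
            _ = rs'.foldl (condMax c2) (max (condMax c2 acc p) p.1) := by
                rw [foldl_condMax_max]
            _ = rs'.foldl (condMax c2) (condMax (fun q => c2 q || c1 q) acc p) := by rw [hm]
        rw [key, ih]
      · have h1' : c1 p = false := by simp at h1; exact h1
        have e1 : condMax c1 (rs'.foldl (condMax c2) (condMax c2 acc p)) p
            = rs'.foldl (condMax c2) (condMax c2 acc p) := by unfold condMax; simp [h1']
        have e2 : condMax (fun q => c2 q || c1 q) acc p = condMax c2 acc p := by
          unfold condMax; simp [h1']
        rw [e1, e2, ih]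

-- The nested word-by-word fold equals the single pass keyed by "some tweet word is in the list".
theorem nested_eq (tweet : List String) (rs : List (Int × List String)) :
    ∀ acc : Int,
      tweet.foldl (fun pd w => rs.foldl (condMax (fun p => decide (w ∈ p.2))) pd) acc
        = rs.foldl (condMax (fun p => tweet.any (fun w => decide (w ∈ p.2)))) acc := by
  induction tweet with
  | nil =>
      intro acc
      simp only [List.foldl_nil, List.any_nil]
      have h : condMax (fun _ => false) = fun (a : Int) (_ : Int × List String) => a := by
        funext a p; rfl
      rw [h]
      exact (PySem.List.foldl_ignore rs acc).symm
  | cons w tw ih =>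
      intro acc
      simp only [List.foldl_cons, ih, List.any_cons]
      exact foldl_condMax_merge _ _ rs acc

-- A's port, normalised to condMax form (uses Nodup keys to resolve the dict lookup).
theorem portA_norm (tweet : List String) (rs : List (Int × List String))
    (hnd : (rs.map Prod.fst).Nodup) :
    prof_deg tweet rs
      = tweet.foldl (fun pd w => rs.foldl (condMax (fun p => decide (w ∈ p.2))) pd) 0 := by
  unfold prof_deg
  apply PySem.List.foldl_congr_mem
  intro pd w _
  apply PySem.List.foldl_congr_mem
  intro a p hp
  have hget : (PySem.Dict.mk rs).get? p.1 = some p.2 := by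
    apply PySem.Dict.get?_of_mem_items
    · exact hp
    · exact hnd
  have hgd : (PySem.Dict.mk rs).getD p.1 [] = p.2 := by
    rw [PySem.Dict.getD_eq_get?_getD, hget]; rfl
  simp only [hgd, condMax, decide_eq_true_eq]
  by_cases hm : w ∈ p.2
  · simp only [if_pos hm]; split_ifs <;> omega
  · simp only [if_neg hm]

-- B's port, normalised to condMax form.
theorem portB_norm (tweet : List String) (rs : List (Int × List String)) :
    prof_deg_alt tweet rs
      = rs.foldl (condMax (fun p => tweet.any (fun w => decide (w ∈ p.2)))) 0 := by
  unfold prof_deg_alt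
  apply PySem.List.foldl_congr_mem
  intro best p _
  have hc : (p.2.any (fun s => PySem.Set.contains (PySem.Set.ofList tweet) s))
      = tweet.any (fun w => decide (w ∈ p.2)) := by
    rw [Bool.eq_iff_iff]
    simp only [List.any_eq_true, decide_eq_true_eq, PySem.Set.contains_iff,
      PySem.Set.mem_ofList]
    constructor
    · rintro ⟨s, hs, ht⟩; exact ⟨s, ht, hs⟩
    · rintro ⟨w, hw, hp⟩; exact ⟨w, hp, hw⟩
  simp only [hc, condMax, List.any_eq_true, decide_eq_true_eq]
  by_cases hE : ∃ x ∈ tweet, x ∈ p.2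
  · simp only [hE, and_true]; split_ifs <;> omega
  · rw [if_neg (fun h => hE h.2), if_neg hE]

-- ===== VERDICT (by name: the statement is the Claim_ definition above) =====
theorem prof_deg_spec : Claim_equal_prof_deg := by
  intro tweet rs _ hpre
  unfold Spec_prof_deg
  rw [portA_norm tweet rs hpre, portB_norm tweet rs, nested_eq]
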